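-- pv_equiv track=rewrite | github.com/oleza034/Skillfactory | Python/13.8.19 Ticket price calculation/main.py | price
-- ===== SOURCE A (Python) =====
-- def price(guest_age: int):
--     '''
--     Returns full price for a guest
--     :param guest_age: age of the guest
--     :return: price applied for the guest of his or her age
--     '''
--     # declare prices dict as age limit and its price. For example, {0: 0} means a guest must be not younger than 0 years
--     prices = {
--         (0, 18): 0, # 1st age from 0 to 18: for free
--         (18, 25): 990, # 2nd age from 18 to 25: discount
--         (25, 200): 1390 # 3rd age older than 25: full price
--     }
--
--     price = None
--
--     for a in prices.keys():
--         if a[0] <= guest_age < a[1]: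
--             price = prices[a]
--
--     return price
-- ===== SOURCE B (Python) =====
-- def price(guest_age: int):
--     if guest_age < 0:
--         return None
--     if guest_age < 18:
--         return 0
--     if guest_age < 25:
--         return 990
--     if guest_age < 200:
--         return 1390
--     return None
-- ===== Notes on version B (the rewrite author's own statement) =====
-- stated objective: simpler
-- what changed: Replaced the prices dict and the loop scanning all age brackets with a direct early-return branch chain over the bracket boundaries.
import Mathlib
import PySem

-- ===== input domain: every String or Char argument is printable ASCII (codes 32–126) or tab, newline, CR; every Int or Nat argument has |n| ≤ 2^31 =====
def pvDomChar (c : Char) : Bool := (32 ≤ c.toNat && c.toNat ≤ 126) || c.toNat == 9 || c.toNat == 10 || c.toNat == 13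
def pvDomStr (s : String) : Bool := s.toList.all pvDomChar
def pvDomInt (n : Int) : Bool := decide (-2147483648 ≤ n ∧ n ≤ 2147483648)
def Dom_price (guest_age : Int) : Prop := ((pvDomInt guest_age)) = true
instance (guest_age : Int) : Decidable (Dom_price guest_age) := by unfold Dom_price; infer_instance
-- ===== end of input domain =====

-- ===== PORT A =====
-- A: dict of (lo,hi)→price, loop over keys, last match wins.
def price (guest_age : Int) : Option Int :=
  let prices : PySem.Dict (Int × Int) Int :=
    (PySem.Dict.empty.insert (0, 18) 0).insert (18, 25) 990 |>.insert (25, 200) 1390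
  (prices.keys).foldl (fun price a =>
    if a.1 ≤ guest_age ∧ guest_age < a.2 then prices.get? a else price) none

-- ===== PORT B =====
-- B: explicit branch chain over the bracket boundaries; no table, no loop.
def price_alt (guest_age : Int) : Option Int :=
  if guest_age < 0 then none
  else if guest_age < 18 then some 0
  else if guest_age < 25 then some 990
  else if guest_age < 200 then some 1390
  else none

-- ===== PRECONDITION & SPEC =====
def Spec_price (guest_age : Int) (out : Option Int) : Prop := out = price_alt guest_age
instance (guest_age : Int) (out : Option Int) : Decidable (Spec_price guest_age out) := by unfold Spec_price; infer_instance

-- ===== CLAIM (what is proved, stated in full; the proofs are below) =====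
def Claim_equal_price : Prop := ∀ (guest_age : Int), Dom_price guest_age → Spec_price guest_age (price guest_age)

-- ===== LEMMAS AND PROOFS =====

-- ===== VERDICT (by name: the statement is the Claim_ definition above) =====
theorem price_spec : Claim_equal_price := by
  intro g _
  unfold Spec_price price price_alt
  simp only [PySem.Dict.keys, PySem.Dict.insert, PySem.Dict.empty, PySem.Dict.get?,
    List.map]
  split_ifs <;> simp_all
  all_goals (split_ifs <;> (try simp_all) <;> omega)
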